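-- pv_equiv track=rewrite | github.com/sametdumankaya/MicroserviceStack | MrF/ctwStrategyLib.py | TStoSymbols
-- ===== SOURCE A (Python) =====
-- def TStoSymbols(ts):
--    data = [ 1 if (ts[i+1] - ts[i]) >= 0 else 0 for i in range(len(ts) - 1)]
--    ups = 0
--    downs = 0
--    syms = []
--    last = None
--    for i in range(len(data)):
--       if data[i] > 0:
--          ups += 1
--          if last is not None and last == 0:
--             syms.append(downs * -1)
--             downs = 0
--       else:
--          downs += 1
--          if last is not None and last > 0:
--             syms.append(ups)
--             ups = 0
--       last = data[i]
--    if ups > 0: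
--       syms.append(ups)
--    elif downs > 0:
--       syms.append(downs * -1)
--
--    return syms
-- ===== SOURCE B (Python) =====
-- from itertools import groupby
--
-- def TStoSymbols(ts):
--     data = [1 if (ts[i + 1] - ts[i]) >= 0 else 0 for i in range(len(ts) - 1)]
--     syms = []
--     for key, grp in groupby(data):
--         n = sum(1 for _ in grp)
--         syms.append(n if key == 1 else -n)
--     return syms
-- ===== Notes on version B (the rewrite author's own statement) =====
-- stated objective: idiomatic
-- what changed: replaces the manual ups/downs/last state machine and its two flush branches with itertools.groupby over the up/down array, emitting each run's signed length directly
import Mathlib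
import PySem

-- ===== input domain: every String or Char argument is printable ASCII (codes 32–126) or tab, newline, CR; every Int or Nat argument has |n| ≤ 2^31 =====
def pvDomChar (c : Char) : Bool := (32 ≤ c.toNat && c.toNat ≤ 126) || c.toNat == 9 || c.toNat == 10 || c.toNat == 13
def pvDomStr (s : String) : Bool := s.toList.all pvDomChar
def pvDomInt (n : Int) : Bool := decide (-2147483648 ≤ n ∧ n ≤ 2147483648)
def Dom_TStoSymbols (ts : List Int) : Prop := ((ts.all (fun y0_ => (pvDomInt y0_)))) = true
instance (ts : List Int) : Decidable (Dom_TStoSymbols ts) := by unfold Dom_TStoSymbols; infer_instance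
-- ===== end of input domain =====

-- B replaces A's manual ups/downs/last state machine with a groupby over the up/down
-- array, emitting each run's signed length directly (objective: idiomatic).

-- ===== PORT A =====
-- the shared comprehension: data = [1 if ts[i+1]-ts[i] >= 0 else 0 for i in range(len(ts)-1)]
def pvData (ts : List Int) : List Int :=
  (PySem.List.pyRange 0 ((ts.length : Int) - 1) 1).map fun i =>
    if PySem.List.pyGetD ts (i + 1) 0 - PySem.List.pyGetD ts i 0 ≥ 0 then (1 : Int) else 0

-- one iteration of A's loop body on state (ups, downs, syms, last)
def pvStepA (s : Int × Int × List Int × Option Int) (x : Int) :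
    Int × Int × List Int × Option Int :=
  match s with
  | (ups, downs, syms, last) =>
    if x > 0 then
      match last with
      | some l => if l = 0 then (ups + 1, 0, syms ++ [downs * -1], some x)
                  else (ups + 1, downs, syms, some x)
      | none => (ups + 1, downs, syms, some x)
    else
      match last with
      | some l => if l > 0 then (0, downs + 1, syms ++ [ups], some x)
                  else (ups, downs + 1, syms, some x)
      | none => (ups, downs + 1, syms, some x)

-- the final flush: if ups > 0 … elif downs > 0 …
def pvFlushA (s : Int × Int × List Int × Option Int) : List Int :=
  match s with
  | (ups, downs, syms, _) =>
    if ups > 0 then syms ++ [ups]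
    else if downs > 0 then syms ++ [downs * -1]
    else syms

def TStoSymbols (ts : List Int) : List Int :=
  pvFlushA ((pvData ts).foldl pvStepA (0, 0, [], none))

-- ===== PORT B =====
-- groupby: consume the current group (key k, n elements seen), then emit n if k == 1 else -n
def pvRuns (k : Int) (n : Int) : List Int → List Int
  | [] => [if k = 1 then n else -n]
  | x :: xs => if x = k then pvRuns k (n + 1) xs
               else (if k = 1 then n else -n) :: pvRuns x 1 xs

def TStoSymbols_alt (ts : List Int) : List Int :=
  match pvData ts with
  | [] => []
  | x :: xs => pvRuns x 1 xs

-- ===== PRECONDITION & SPEC =====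
def Spec_TStoSymbols (ts : List Int) (out : List Int) : Prop := out = TStoSymbols_alt ts
instance (ts : List Int) (out : List Int) : Decidable (Spec_TStoSymbols ts out) := by unfold Spec_TStoSymbols; infer_instance

-- ===== CLAIM (what is proved, stated in full; the proofs are below) =====
def Claim_equal_TStoSymbols : Prop := ∀ (ts : List Int), Dom_TStoSymbols ts → Spec_TStoSymbols ts (TStoSymbols ts)

-- ===== LEMMAS AND PROOFS =====

-- every element of data is 0 or 1
theorem pvData_mem (ts : List Int) : ∀ x ∈ pvData ts, x = 0 ∨ x = 1 := by
  intro x hx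
  simp only [pvData, List.mem_map] at hx
  obtain ⟨i, _, hi⟩ := hx
  split at hi <;> omega

-- loop invariant: in the middle of a run of key k with count c (c > 0), A's remaining
-- loop + flush produces exactly the groups B's pvRuns produces
theorem pv_main (xs : List Int) (h : ∀ x ∈ xs, x = 0 ∨ x = 1) :
    ∀ c syms, 0 < c →
      pvFlushA (xs.foldl pvStepA (c, 0, syms, some 1)) = syms ++ pvRuns 1 c xs
      ∧ pvFlushA (xs.foldl pvStepA (0, c, syms, some 0)) = syms ++ pvRuns 0 c xs := by
  induction xs with
  | nil =>
    intro c syms hc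
    constructor
    · simp [pvFlushA, pvRuns, hc]
    · simp [pvFlushA, pvRuns, hc]
  | cons x xs ih =>
    intro c syms hc
    have hx := h x (by simp)
    have hxs : ∀ y ∈ xs, y = 0 ∨ y = 1 := fun y hy => h y (by simp [hy])
    rcases hx with hx | hx <;> subst hx
    · constructor
      · -- key 1, next element 0: flush ups, start a down-run
        simp only [List.foldl_cons, pvStepA, pvRuns]
        norm_num
        rw [(ih hxs 1 (syms ++ [c]) (by omega)).2]
        simp
      · -- key 0, next element 0: extend the run
        simp only [List.foldl_cons, pvStepA, pvRuns]
        norm_num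
        rw [(ih hxs (c + 1) syms (by omega)).2]
    · constructor
      · -- key 1, next element 1: extend the run
        simp only [List.foldl_cons, pvStepA, pvRuns]
        norm_num
        rw [(ih hxs (c + 1) syms (by omega)).1]
      · -- key 0, next element 1: flush downs, start an up-run
        simp only [List.foldl_cons, pvStepA, pvRuns]
        norm_num
        rw [(ih hxs 1 (syms ++ [-c]) (by omega)).1]
        simp

-- ===== VERDICT (by name: the statement is the Claim_ definition above) =====
theorem TStoSymbols_spec : Claim_equal_TStoSymbols := by
  intro ts _
  unfold Spec_TStoSymbols TStoSymbols TStoSymbols_alt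
  cases hd : pvData ts with
  | nil => simp [pvFlushA]
  | cons x xs =>
    have hmem := pvData_mem ts
    rw [hd] at hmem
    have hx := hmem x (by simp)
    have hxs : ∀ y ∈ xs, y = 0 ∨ y = 1 := fun y hy => hmem y (by simp [hy])
    rcases hx with hx | hx <;> subst hx
    · simp only [List.foldl_cons, pvStepA]
      norm_num
      exact (pv_main xs hxs 1 [] (by omega)).2
    · simp only [List.foldl_cons, pvStepA]
      norm_num
      exact (pv_main xs hxs 1 [] (by omega)).1
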